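-- pv_equiv track=rewrite | github.com/rickohnemorty/sudokuTool | python code/unused functions/functionCollection.py | combine_to_squares
-- ===== SOURCE A (Python) =====
-- def combine_to_squares(puzzle):
--     splitArr = split_rows(puzzle)
--     squares = [[], [], [],
--                [], [], [],
--                [], [], []]
--     counter = 0
--     for i in splitArr:
--         if counter == 0 or counter == 3 or counter == 6:
--             squares[0].append(i)
--         elif counter == 1 or counter == 4 or counter == 7:
--             squares[1].append(i)
--         elif counter == 2 or counter == 5 or counter == 8:
--             squares[2].append(i)
--         elif counter == 9 or counter == 12 or counter == 15:
--             squares[3].append(i)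
--         elif counter == 10 or counter == 13 or counter == 16:
--             squares[4].append(i)
--         elif counter == 11 or counter == 14 or counter == 17:
--             squares[5].append(i)
--         elif counter == 18 or counter == 21 or counter == 24:
--             squares[6].append(i)
--         elif counter == 19 or counter == 22 or counter == 25:
--             squares[7].append(i)
--         elif counter == 20 or counter == 23 or counter == 26:
--             squares[8].append(i)
--         else:
--             pass
--         counter += 1
--     return squares
--
-- def split_rows(puzzle):
--     splitArr = []
--     for i in puzzle:
--         splitArr.append(i[:3])
--         splitArr.append(i[3:6])
--         splitArr.append(i[6:9])
--     return splitArr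
-- ===== SOURCE B (Python) =====
-- def combine_to_squares(puzzle):
--     return [[puzzle[r][3 * (s % 3): 3 * (s % 3) + 3]
--              for r in range(3 * (s // 3), 3 * (s // 3) + 3)
--              if r < len(puzzle)]
--             for s in range(9)]
-- ===== Notes on version B (the rewrite author's own statement) =====
-- stated objective: alternative
-- what changed: Replaces A's scatter (split every row into thirds, then distribute them into 9 mutable buckets via a running counter and a 9-branch elif ladder) with a gather: a pure nested comprehension that builds each of the 9 squares directly by reading exactly the rows and column block it needs, with no intermediate split list and no mutation.
import Mathlib
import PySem

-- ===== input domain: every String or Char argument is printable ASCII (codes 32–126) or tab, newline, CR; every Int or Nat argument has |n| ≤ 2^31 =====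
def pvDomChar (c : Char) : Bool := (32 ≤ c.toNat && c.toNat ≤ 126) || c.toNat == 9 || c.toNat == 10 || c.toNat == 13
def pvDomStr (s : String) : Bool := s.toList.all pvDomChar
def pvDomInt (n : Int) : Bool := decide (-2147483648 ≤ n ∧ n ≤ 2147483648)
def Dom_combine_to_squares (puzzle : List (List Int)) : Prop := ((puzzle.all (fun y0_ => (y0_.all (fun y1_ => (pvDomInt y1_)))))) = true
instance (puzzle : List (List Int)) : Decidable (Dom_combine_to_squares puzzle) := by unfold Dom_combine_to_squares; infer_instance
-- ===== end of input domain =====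

-- B builds each of the 9 squares directly (gather) instead of splitting every row into thirds and
-- scattering them into 9 mutable buckets through a running counter + elif ladder (objective: alternative).

-- ===== PORT A =====
-- squares[k].append(x); exact here because A only uses indices 0..8 into the 9-element list
def pvAppendAt (sq : List (List (List Int))) (k : Int) (x : List Int) : List (List (List Int)) :=
  sq.modify k.toNat (fun l => l ++ [x])

def split_rows (puzzle : List (List Int)) : List (List Int) :=
  puzzle.foldl (fun splitArr i =>
    splitArr ++ [PySem.List.slice i none (some 3),
                 PySem.List.slice i (some 3) (some 6),
                 PySem.List.slice i (some 6) (some 9)]) []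

def pvStepA (st : List (List (List Int)) × Int) (i : List Int) : List (List (List Int)) × Int :=
  let squares := st.1
  let counter := st.2
  (if counter = 0 ∨ counter = 3 ∨ counter = 6 then pvAppendAt squares 0 i
    else if counter = 1 ∨ counter = 4 ∨ counter = 7 then pvAppendAt squares 1 i
    else if counter = 2 ∨ counter = 5 ∨ counter = 8 then pvAppendAt squares 2 i
    else if counter = 9 ∨ counter = 12 ∨ counter = 15 then pvAppendAt squares 3 i
    else if counter = 10 ∨ counter = 13 ∨ counter = 16 then pvAppendAt squares 4 i
    else if counter = 11 ∨ counter = 14 ∨ counter = 17 then pvAppendAt squares 5 i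
    else if counter = 18 ∨ counter = 21 ∨ counter = 24 then pvAppendAt squares 6 i
    else if counter = 19 ∨ counter = 22 ∨ counter = 25 then pvAppendAt squares 7 i
    else if counter = 20 ∨ counter = 23 ∨ counter = 26 then pvAppendAt squares 8 i
    else squares,
   counter + 1)

def combine_to_squares (puzzle : List (List Int)) : List (List (List Int)) :=
  let splitArr := split_rows puzzle
  ((splitArr.foldl pvStepA ([[], [], [], [], [], [], [], [], []], 0))).1

-- ===== PORT B =====
-- [[puzzle[r][3*(s%3):3*(s%3)+3] for r in range(3*(s//3), 3*(s//3)+3) if r < len(puzzle)] for s in range(9)]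
-- (the 'if r < len(puzzle)' guard makes puzzle[r] in range, so pyGetD's default is never used)
def combine_to_squares_alt (puzzle : List (List Int)) : List (List (List Int)) :=
  (PySem.List.pyRange 0 9 1).map (fun s =>
    (((PySem.List.pyRange (3 * PySem.Int.floordiv s 3) (3 * PySem.Int.floordiv s 3 + 3) 1).filter
        (fun r => decide (r < (puzzle.length : Int)))).map
      (fun r => PySem.List.slice (PySem.List.pyGetD puzzle r [])
        (some (3 * PySem.Int.mod s 3)) (some (3 * PySem.Int.mod s 3 + 3)))))

-- ===== PRECONDITION & SPEC =====
def Spec_combine_to_squares (puzzle : List (List Int)) (out : List (List (List Int))) : Prop := out = combine_to_squares_alt puzzle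
instance (puzzle : List (List Int)) (out : List (List (List Int))) : Decidable (Spec_combine_to_squares puzzle out) := by unfold Spec_combine_to_squares; infer_instance

-- ===== CLAIM =====
def Claim_equal_combine_to_squares : Prop := ∀ (puzzle : List (List Int)), Dom_combine_to_squares puzzle → Spec_combine_to_squares puzzle (combine_to_squares puzzle)

-- ===== LEMMAS AND PROOFS =====

-- an A-step with counter >= 27 leaves the squares unchanged (the final 'else: pass')
lemma pvStepA_big (sq : List (List (List Int))) (c : Int) (i : List Int) (h : 27 <= c) :
    pvStepA (sq, c) i = (sq, c + 1) := by
  simp only [pvStepA]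
  rw [if_neg (by omega), if_neg (by omega), if_neg (by omega), if_neg (by omega),
    if_neg (by omega), if_neg (by omega), if_neg (by omega), if_neg (by omega), if_neg (by omega)]

lemma pvFoldA_big (l : List (List Int)) : ∀ (sq : List (List (List Int))) (c : Int), 27 <= c →
    (l.foldl pvStepA (sq, c)).1 = sq := by
  induction l with
  | nil => intro sq c _; rfl
  | cons x xs ih =>
    intro sq c h
    rw [List.foldl_cons, pvStepA_big _ _ _ h]
    exact ih sq (c + 1) (by omega)

lemma pvFoldA_snd (l : List (List Int)) : ∀ (sq : List (List (List Int))) (c : Int),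
    (List.foldl pvStepA (sq, c) l).2 = c + l.length := by
  induction l with
  | nil => intro sq c; simp
  | cons x xs ih =>
    intro sq c
    rw [List.foldl_cons]
    have h1 : (pvStepA (sq, c) x).2 = c + 1 := by simp [pvStepA]
    rw [show pvStepA (sq, c) x = ((pvStepA (sq, c) x).1, c + 1) from by rw [← h1]]
    rw [ih]
    simp only [List.length_cons]
    push_cast; ring

lemma pvSplit_rows_flat (puzzle : List (List Int)) :
    split_rows puzzle = puzzle.flatMap (fun i =>
      [PySem.List.slice i none (some 3), PySem.List.slice i (some 3) (some 6),
       PySem.List.slice i (some 6) (some 9)]) := by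
  unfold split_rows
  rw [PySem.List.foldl_append_eq_flatMap]
  simp

lemma pvLen_split_nine (a0 a1 a2 a3 a4 a5 a6 a7 a8 : List Int) :
    (split_rows [a0,a1,a2,a3,a4,a5,a6,a7,a8]).length = 27 := by
  simp [pvSplit_rows_flat]

set_option maxHeartbeats 3200000 in
lemma pvNine (a0 a1 a2 a3 a4 a5 a6 a7 a8 : List Int) :
    combine_to_squares [a0,a1,a2,a3,a4,a5,a6,a7,a8] =
    combine_to_squares_alt [a0,a1,a2,a3,a4,a5,a6,a7,a8] := by
  have h1 : PySem.List.pyRange 0 9 1 = [0,1,2,3,4,5,6,7,8] := by decide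
  have h2 : PySem.List.pyRange 0 3 1 = [0,1,2] := by decide
  have h3 : PySem.List.pyRange 3 6 1 = [3,4,5] := by decide
  have h4 : PySem.List.pyRange 6 9 1 = [6,7,8] := by decide
  norm_num [combine_to_squares, combine_to_squares_alt, split_rows, pvStepA, pvAppendAt,
    h1, h2, h3, h4, PySem.List.pyGetD, PySem.List.pyIdx?, PySem.List.pyGet?,
    List.filter, List.modify, List.modifyTailIdx, List.modifyTailIdx.go, List.modifyHead, Int.toNat,
    show PySem.Int.floordiv 0 3 = 0 from by decide, show PySem.Int.floordiv 1 3 = 0 from by decide,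
    show PySem.Int.floordiv 2 3 = 0 from by decide, show PySem.Int.floordiv 3 3 = 1 from by decide,
    show PySem.Int.floordiv 4 3 = 1 from by decide, show PySem.Int.floordiv 5 3 = 1 from by decide,
    show PySem.Int.floordiv 6 3 = 2 from by decide, show PySem.Int.floordiv 7 3 = 2 from by decide,
    show PySem.Int.floordiv 8 3 = 2 from by decide,
    show PySem.Int.mod 0 3 = 0 from by decide, show PySem.Int.mod 1 3 = 1 from by decide,
    show PySem.Int.mod 2 3 = 2 from by decide, show PySem.Int.mod 3 3 = 0 from by decide,
    show PySem.Int.mod 4 3 = 1 from by decide, show PySem.Int.mod 5 3 = 2 from by decide,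
    show PySem.Int.mod 6 3 = 0 from by decide, show PySem.Int.mod 7 3 = 1 from by decide,
    show PySem.Int.mod 8 3 = 2 from by decide]

set_option maxHeartbeats 1600000 in
lemma pvAltNine (a0 a1 a2 a3 a4 a5 a6 a7 a8 : List Int) (rest : List (List Int)) :
    combine_to_squares_alt (a0 :: a1 :: a2 :: a3 :: a4 :: a5 :: a6 :: a7 :: a8 :: rest) =
    combine_to_squares_alt [a0,a1,a2,a3,a4,a5,a6,a7,a8] := by
  have h1 : PySem.List.pyRange 0 9 1 = [0,1,2,3,4,5,6,7,8] := by decide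
  have h2 : PySem.List.pyRange 0 3 1 = [0,1,2] := by decide
  have h3 : PySem.List.pyRange 3 6 1 = [3,4,5] := by decide
  have h4 : PySem.List.pyRange 6 9 1 = [6,7,8] := by decide
  have g : ∀ (r : Int), 0 ≤ r → r < 9 →
      PySem.List.pyGetD (a0 :: a1 :: a2 :: a3 :: a4 :: a5 :: a6 :: a7 :: a8 :: rest) r ([] : List Int) =
      PySem.List.pyGetD [a0,a1,a2,a3,a4,a5,a6,a7,a8] r ([] : List Int) := by
    intro r h0 h9
    rw [PySem.List.pyGetD_eq_getElem _ _ h0 (by simp; omega),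
        PySem.List.pyGetD_eq_getElem _ _ h0 (by simp; omega)]
    show ([a0,a1,a2,a3,a4,a5,a6,a7,a8] ++ rest)[r.toNat]'(by simp; omega) = _
    rw [List.getElem_append_left (by simp; omega)]
  have fA : ∀ (l : List Int), (∀ r ∈ l, 0 ≤ r ∧ r < 9) →
      List.filter (fun r => decide (r < (((a0 :: a1 :: a2 :: a3 :: a4 :: a5 :: a6 :: a7 :: a8 :: rest).length : Nat) : Int))) l = l := by
    intro l hl
    apply List.filter_eq_self.mpr; intro r hr; rw [decide_eq_true_eq]
    have := hl r hr; simp; omega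
  have fB : ∀ (l : List Int), (∀ r ∈ l, 0 ≤ r ∧ r < 9) →
      List.filter (fun r => decide (r < ((([a0,a1,a2,a3,a4,a5,a6,a7,a8] : List (List Int)).length : Nat) : Int))) l = l := by
    intro l hl
    apply List.filter_eq_self.mpr; intro r hr; rw [decide_eq_true_eq]
    have := hl r hr; simp; omega
  simp only [combine_to_squares_alt, h1,
    show PySem.Int.floordiv 0 3 = 0 from by decide, show PySem.Int.floordiv 1 3 = 0 from by decide,
    show PySem.Int.floordiv 2 3 = 0 from by decide, show PySem.Int.floordiv 3 3 = 1 from by decide,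
    show PySem.Int.floordiv 4 3 = 1 from by decide, show PySem.Int.floordiv 5 3 = 1 from by decide,
    show PySem.Int.floordiv 6 3 = 2 from by decide, show PySem.Int.floordiv 7 3 = 2 from by decide,
    show PySem.Int.floordiv 8 3 = 2 from by decide,
    show PySem.Int.mod 0 3 = 0 from by decide, show PySem.Int.mod 1 3 = 1 from by decide,
    show PySem.Int.mod 2 3 = 2 from by decide, show PySem.Int.mod 3 3 = 0 from by decide,
    show PySem.Int.mod 4 3 = 1 from by decide, show PySem.Int.mod 5 3 = 2 from by decide,
    show PySem.Int.mod 6 3 = 0 from by decide, show PySem.Int.mod 7 3 = 1 from by decide,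
    show PySem.Int.mod 8 3 = 2 from by decide,
    show ((3:Int) * 0) = 0 from by norm_num, show ((3:Int) * 1) = 3 from by norm_num,
    show ((3:Int) * 2) = 6 from by norm_num,
    show ((0:Int) + 3) = 3 from by norm_num, show ((3:Int) + 3) = 6 from by norm_num,
    show ((6:Int) + 3) = 9 from by norm_num,
    h2, h3, h4,
    fA [0,1,2] (by decide), fA [3,4,5] (by decide), fA [6,7,8] (by decide),
    fB [0,1,2] (by decide), fB [3,4,5] (by decide), fB [6,7,8] (by decide),
    List.map]
  norm_num [g]

set_option maxHeartbeats 3200000 in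
lemma pvMain (puzzle : List (List Int)) : combine_to_squares puzzle = combine_to_squares_alt puzzle := by
  have h1 : PySem.List.pyRange 0 9 1 = [0,1,2,3,4,5,6,7,8] := by decide
  have h2 : PySem.List.pyRange 0 3 1 = [0,1,2] := by decide
  have h3 : PySem.List.pyRange 3 6 1 = [3,4,5] := by decide
  have h4 : PySem.List.pyRange 6 9 1 = [6,7,8] := by decide
  rcases puzzle with _ | ⟨a0, _ | ⟨a1, _ | ⟨a2, _ | ⟨a3, _ | ⟨a4, _ | ⟨a5, _ | ⟨a6, _ | ⟨a7, _ | ⟨a8, rest⟩⟩⟩⟩⟩⟩⟩⟩⟩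
  · decide
  · -- 1 rows
      norm_num [combine_to_squares, combine_to_squares_alt, split_rows, pvStepA, pvAppendAt,
        h1, h2, h3, h4, PySem.List.pyGetD, PySem.List.pyIdx?, PySem.List.pyGet?,
        List.filter, List.modify, List.modifyTailIdx, List.modifyTailIdx.go, List.modifyHead, Int.toNat,
        show PySem.Int.floordiv 0 3 = 0 from by decide, show PySem.Int.floordiv 1 3 = 0 from by decide,
        show PySem.Int.floordiv 2 3 = 0 from by decide, show PySem.Int.floordiv 3 3 = 1 from by decide,
        show PySem.Int.floordiv 4 3 = 1 from by decide, show PySem.Int.floordiv 5 3 = 1 from by decide,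
        show PySem.Int.floordiv 6 3 = 2 from by decide, show PySem.Int.floordiv 7 3 = 2 from by decide,
        show PySem.Int.floordiv 8 3 = 2 from by decide,
        show PySem.Int.mod 0 3 = 0 from by decide, show PySem.Int.mod 1 3 = 1 from by decide,
        show PySem.Int.mod 2 3 = 2 from by decide, show PySem.Int.mod 3 3 = 0 from by decide,
        show PySem.Int.mod 4 3 = 1 from by decide, show PySem.Int.mod 5 3 = 2 from by decide,
        show PySem.Int.mod 6 3 = 0 from by decide, show PySem.Int.mod 7 3 = 1 from by decide,
        show PySem.Int.mod 8 3 = 2 from by decide]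
  · -- 2 rows
      norm_num [combine_to_squares, combine_to_squares_alt, split_rows, pvStepA, pvAppendAt,
        h1, h2, h3, h4, PySem.List.pyGetD, PySem.List.pyIdx?, PySem.List.pyGet?,
        List.filter, List.modify, List.modifyTailIdx, List.modifyTailIdx.go, List.modifyHead, Int.toNat,
        show PySem.Int.floordiv 0 3 = 0 from by decide, show PySem.Int.floordiv 1 3 = 0 from by decide,
        show PySem.Int.floordiv 2 3 = 0 from by decide, show PySem.Int.floordiv 3 3 = 1 from by decide,
        show PySem.Int.floordiv 4 3 = 1 from by decide, show PySem.Int.floordiv 5 3 = 1 from by decide,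
        show PySem.Int.floordiv 6 3 = 2 from by decide, show PySem.Int.floordiv 7 3 = 2 from by decide,
        show PySem.Int.floordiv 8 3 = 2 from by decide,
        show PySem.Int.mod 0 3 = 0 from by decide, show PySem.Int.mod 1 3 = 1 from by decide,
        show PySem.Int.mod 2 3 = 2 from by decide, show PySem.Int.mod 3 3 = 0 from by decide,
        show PySem.Int.mod 4 3 = 1 from by decide, show PySem.Int.mod 5 3 = 2 from by decide,
        show PySem.Int.mod 6 3 = 0 from by decide, show PySem.Int.mod 7 3 = 1 from by decide,
        show PySem.Int.mod 8 3 = 2 from by decide]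
  · -- 3 rows
      norm_num [combine_to_squares, combine_to_squares_alt, split_rows, pvStepA, pvAppendAt,
        h1, h2, h3, h4, PySem.List.pyGetD, PySem.List.pyIdx?, PySem.List.pyGet?,
        List.filter, List.modify, List.modifyTailIdx, List.modifyTailIdx.go, List.modifyHead, Int.toNat,
        show PySem.Int.floordiv 0 3 = 0 from by decide, show PySem.Int.floordiv 1 3 = 0 from by decide,
        show PySem.Int.floordiv 2 3 = 0 from by decide, show PySem.Int.floordiv 3 3 = 1 from by decide,
        show PySem.Int.floordiv 4 3 = 1 from by decide, show PySem.Int.floordiv 5 3 = 1 from by decide,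
        show PySem.Int.floordiv 6 3 = 2 from by decide, show PySem.Int.floordiv 7 3 = 2 from by decide,
        show PySem.Int.floordiv 8 3 = 2 from by decide,
        show PySem.Int.mod 0 3 = 0 from by decide, show PySem.Int.mod 1 3 = 1 from by decide,
        show PySem.Int.mod 2 3 = 2 from by decide, show PySem.Int.mod 3 3 = 0 from by decide,
        show PySem.Int.mod 4 3 = 1 from by decide, show PySem.Int.mod 5 3 = 2 from by decide,
        show PySem.Int.mod 6 3 = 0 from by decide, show PySem.Int.mod 7 3 = 1 from by decide,
        show PySem.Int.mod 8 3 = 2 from by decide]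
  · -- 4 rows
      norm_num [combine_to_squares, combine_to_squares_alt, split_rows, pvStepA, pvAppendAt,
        h1, h2, h3, h4, PySem.List.pyGetD, PySem.List.pyIdx?, PySem.List.pyGet?,
        List.filter, List.modify, List.modifyTailIdx, List.modifyTailIdx.go, List.modifyHead, Int.toNat,
        show PySem.Int.floordiv 0 3 = 0 from by decide, show PySem.Int.floordiv 1 3 = 0 from by decide,
        show PySem.Int.floordiv 2 3 = 0 from by decide, show PySem.Int.floordiv 3 3 = 1 from by decide,
        show PySem.Int.floordiv 4 3 = 1 from by decide, show PySem.Int.floordiv 5 3 = 1 from by decide,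
        show PySem.Int.floordiv 6 3 = 2 from by decide, show PySem.Int.floordiv 7 3 = 2 from by decide,
        show PySem.Int.floordiv 8 3 = 2 from by decide,
        show PySem.Int.mod 0 3 = 0 from by decide, show PySem.Int.mod 1 3 = 1 from by decide,
        show PySem.Int.mod 2 3 = 2 from by decide, show PySem.Int.mod 3 3 = 0 from by decide,
        show PySem.Int.mod 4 3 = 1 from by decide, show PySem.Int.mod 5 3 = 2 from by decide,
        show PySem.Int.mod 6 3 = 0 from by decide, show PySem.Int.mod 7 3 = 1 from by decide,
        show PySem.Int.mod 8 3 = 2 from by decide]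
  · -- 5 rows
      norm_num [combine_to_squares, combine_to_squares_alt, split_rows, pvStepA, pvAppendAt,
        h1, h2, h3, h4, PySem.List.pyGetD, PySem.List.pyIdx?, PySem.List.pyGet?,
        List.filter, List.modify, List.modifyTailIdx, List.modifyTailIdx.go, List.modifyHead, Int.toNat,
        show PySem.Int.floordiv 0 3 = 0 from by decide, show PySem.Int.floordiv 1 3 = 0 from by decide,
        show PySem.Int.floordiv 2 3 = 0 from by decide, show PySem.Int.floordiv 3 3 = 1 from by decide,
        show PySem.Int.floordiv 4 3 = 1 from by decide, show PySem.Int.floordiv 5 3 = 1 from by decide,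
        show PySem.Int.floordiv 6 3 = 2 from by decide, show PySem.Int.floordiv 7 3 = 2 from by decide,
        show PySem.Int.floordiv 8 3 = 2 from by decide,
        show PySem.Int.mod 0 3 = 0 from by decide, show PySem.Int.mod 1 3 = 1 from by decide,
        show PySem.Int.mod 2 3 = 2 from by decide, show PySem.Int.mod 3 3 = 0 from by decide,
        show PySem.Int.mod 4 3 = 1 from by decide, show PySem.Int.mod 5 3 = 2 from by decide,
        show PySem.Int.mod 6 3 = 0 from by decide, show PySem.Int.mod 7 3 = 1 from by decide,
        show PySem.Int.mod 8 3 = 2 from by decide]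
  · -- 6 rows
      norm_num [combine_to_squares, combine_to_squares_alt, split_rows, pvStepA, pvAppendAt,
        h1, h2, h3, h4, PySem.List.pyGetD, PySem.List.pyIdx?, PySem.List.pyGet?,
        List.filter, List.modify, List.modifyTailIdx, List.modifyTailIdx.go, List.modifyHead, Int.toNat,
        show PySem.Int.floordiv 0 3 = 0 from by decide, show PySem.Int.floordiv 1 3 = 0 from by decide,
        show PySem.Int.floordiv 2 3 = 0 from by decide, show PySem.Int.floordiv 3 3 = 1 from by decide,
        show PySem.Int.floordiv 4 3 = 1 from by decide, show PySem.Int.floordiv 5 3 = 1 from by decide,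
        show PySem.Int.floordiv 6 3 = 2 from by decide, show PySem.Int.floordiv 7 3 = 2 from by decide,
        show PySem.Int.floordiv 8 3 = 2 from by decide,
        show PySem.Int.mod 0 3 = 0 from by decide, show PySem.Int.mod 1 3 = 1 from by decide,
        show PySem.Int.mod 2 3 = 2 from by decide, show PySem.Int.mod 3 3 = 0 from by decide,
        show PySem.Int.mod 4 3 = 1 from by decide, show PySem.Int.mod 5 3 = 2 from by decide,
        show PySem.Int.mod 6 3 = 0 from by decide, show PySem.Int.mod 7 3 = 1 from by decide,
        show PySem.Int.mod 8 3 = 2 from by decide]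
  · -- 7 rows
      norm_num [combine_to_squares, combine_to_squares_alt, split_rows, pvStepA, pvAppendAt,
        h1, h2, h3, h4, PySem.List.pyGetD, PySem.List.pyIdx?, PySem.List.pyGet?,
        List.filter, List.modify, List.modifyTailIdx, List.modifyTailIdx.go, List.modifyHead, Int.toNat,
        show PySem.Int.floordiv 0 3 = 0 from by decide, show PySem.Int.floordiv 1 3 = 0 from by decide,
        show PySem.Int.floordiv 2 3 = 0 from by decide, show PySem.Int.floordiv 3 3 = 1 from by decide,
        show PySem.Int.floordiv 4 3 = 1 from by decide, show PySem.Int.floordiv 5 3 = 1 from by decide,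
        show PySem.Int.floordiv 6 3 = 2 from by decide, show PySem.Int.floordiv 7 3 = 2 from by decide,
        show PySem.Int.floordiv 8 3 = 2 from by decide,
        show PySem.Int.mod 0 3 = 0 from by decide, show PySem.Int.mod 1 3 = 1 from by decide,
        show PySem.Int.mod 2 3 = 2 from by decide, show PySem.Int.mod 3 3 = 0 from by decide,
        show PySem.Int.mod 4 3 = 1 from by decide, show PySem.Int.mod 5 3 = 2 from by decide,
        show PySem.Int.mod 6 3 = 0 from by decide, show PySem.Int.mod 7 3 = 1 from by decide,
        show PySem.Int.mod 8 3 = 2 from by decide]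
  · -- 8 rows
      norm_num [combine_to_squares, combine_to_squares_alt, split_rows, pvStepA, pvAppendAt,
        h1, h2, h3, h4, PySem.List.pyGetD, PySem.List.pyIdx?, PySem.List.pyGet?,
        List.filter, List.modify, List.modifyTailIdx, List.modifyTailIdx.go, List.modifyHead, Int.toNat,
        show PySem.Int.floordiv 0 3 = 0 from by decide, show PySem.Int.floordiv 1 3 = 0 from by decide,
        show PySem.Int.floordiv 2 3 = 0 from by decide, show PySem.Int.floordiv 3 3 = 1 from by decide,
        show PySem.Int.floordiv 4 3 = 1 from by decide, show PySem.Int.floordiv 5 3 = 1 from by decide,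
        show PySem.Int.floordiv 6 3 = 2 from by decide, show PySem.Int.floordiv 7 3 = 2 from by decide,
        show PySem.Int.floordiv 8 3 = 2 from by decide,
        show PySem.Int.mod 0 3 = 0 from by decide, show PySem.Int.mod 1 3 = 1 from by decide,
        show PySem.Int.mod 2 3 = 2 from by decide, show PySem.Int.mod 3 3 = 0 from by decide,
        show PySem.Int.mod 4 3 = 1 from by decide, show PySem.Int.mod 5 3 = 2 from by decide,
        show PySem.Int.mod 6 3 = 0 from by decide, show PySem.Int.mod 7 3 = 1 from by decide,
        show PySem.Int.mod 8 3 = 2 from by decide]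
  · -- 9 or more rows: rows past the first nine fall into A's final 'else: pass',
    -- and B's guard 'r < len(puzzle)' only admits rows 0..8 anyway
    have hA : combine_to_squares (a0 :: a1 :: a2 :: a3 :: a4 :: a5 :: a6 :: a7 :: a8 :: rest) =
        combine_to_squares [a0,a1,a2,a3,a4,a5,a6,a7,a8] := by
      show (List.foldl pvStepA ([[],[],[],[],[],[],[],[],[]], 0)
          (split_rows (a0 :: a1 :: a2 :: a3 :: a4 :: a5 :: a6 :: a7 :: a8 :: rest))).1 = _
      rw [pvSplit_rows_flat]
      have h9 : (a0 :: a1 :: a2 :: a3 :: a4 :: a5 :: a6 :: a7 :: a8 :: rest) =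
          [a0,a1,a2,a3,a4,a5,a6,a7,a8] ++ rest := rfl
      rw [h9, List.flatMap_append, List.foldl_append]
      set X := List.foldl pvStepA ([[],[],[],[],[],[],[],[],[]], 0)
        (List.flatMap (fun i => [PySem.List.slice i none (some 3), PySem.List.slice i (some 3) (some 6),
          PySem.List.slice i (some 6) (some 9)]) [a0,a1,a2,a3,a4,a5,a6,a7,a8]) with hX
      have hX2 : X.2 = 27 := by
        rw [hX, ← pvSplit_rows_flat, pvFoldA_snd, pvLen_split_nine]; ring
      have hXeta : X = (X.1, (27 : Int)) := by rw [← hX2]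
      rw [hXeta, pvFoldA_big _ _ _ (by omega)]
      show X.1 = _
      rw [hX, ← pvSplit_rows_flat]
      rfl
    rw [hA, pvNine, pvAltNine a0 a1 a2 a3 a4 a5 a6 a7 a8 rest]

-- ===== VERDICT =====
theorem combine_to_squares_spec : Claim_equal_combine_to_squares := by
  intro puzzle _
  exact pvMain puzzle
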